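-- pv_equiv track=rewrite | github.com/lmendezayl/uba-algoritmos-3 | talleres/taller1/converitbilidad.py | convertibilidad
-- ===== SOURCE A (Python) =====
-- def convertibilidad(x, y, seq=None):
--     if seq is None:
--         seq = [x]
--     if x == y:
--         return seq
--     if x > y:
--         return None
--     res = convertibilidad(x * 2, y, seq + [x * 2])
--     if res is not None:
--         return res
--     res = convertibilidad(x * 10 + 1, y, seq + [x * 10 + 1])
--     if res is not None:
--         return res
--     return None
-- ===== SOURCE B (Python) =====
-- def convertibilidad(x, y, seq=None):
--     # Reverse deterministic reconstruction: each value has at most one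
--     # predecessor (even -> v//2, last digit 1 -> (v-1)//10), so walk back from y.
--     if seq is None:
--         seq = [x]
--     if y < x:
--         return None
--     path = []
--     v = y
--     while v > x:
--         if v <= 0:
--             return None
--         path.append(v)
--         if v % 2 == 0:
--             v //= 2
--         elif v % 10 == 1:
--             v = (v - 1) // 10
--         else:
--             return None
--     if v == x:
--         return seq + path[::-1]
--     return None
-- ===== Notes on version B (the rewrite author's own statement) =====
-- stated objective: alternative
-- what changed: A searches forward from x with a DFS that tries every *2 / *10+1 chain up to y; B reconstructs the unique chain backward from y in one deterministic pass (even -> v//2, last digit 1 -> (v-1)//10), possible because the two operations produce values of disjoint shapes.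
import Mathlib
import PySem

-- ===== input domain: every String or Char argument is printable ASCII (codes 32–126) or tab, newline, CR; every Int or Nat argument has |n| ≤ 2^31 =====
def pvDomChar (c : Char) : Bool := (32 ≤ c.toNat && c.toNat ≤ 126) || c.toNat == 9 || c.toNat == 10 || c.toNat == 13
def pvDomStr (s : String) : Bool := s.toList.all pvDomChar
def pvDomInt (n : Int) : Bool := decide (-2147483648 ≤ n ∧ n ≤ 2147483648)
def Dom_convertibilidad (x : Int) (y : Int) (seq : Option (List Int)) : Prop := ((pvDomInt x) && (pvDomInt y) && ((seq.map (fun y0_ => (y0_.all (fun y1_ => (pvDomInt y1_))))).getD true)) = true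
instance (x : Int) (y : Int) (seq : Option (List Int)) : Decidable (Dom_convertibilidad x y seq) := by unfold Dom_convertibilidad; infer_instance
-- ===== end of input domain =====

-- B replaces A's exhaustive forward DFS over all *2 / *10+1 chains by the deterministic
-- backward walk from y (even → halve, last digit 1 → strip it), a single deterministic pass.

-- ===== PORT A =====
-- A's recursion never returns in Python when x ≤ 0 ∧ x < y (excluded by Pre_); the fuel
-- parameter only makes the same recursion total in Lean and is never exhausted inside Pre_.
def convGo (fuel : Nat) (x : Int) (y : Int) (s : List Int) : Option (List Int) :=
  match fuel with
  | 0 => none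
  | fuel + 1 =>
    if x = y then some s
    else if x > y then none
    else
      match convGo fuel (x * 2) y (s ++ [x * 2]) with
      | some res => some res
      | none =>
        match convGo fuel (x * 10 + 1) y (s ++ [x * 10 + 1]) with
        | some res => some res
        | none => none

def convertibilidad (x : Int) (y : Int) (seq : Option (List Int)) : Option (List Int) :=
  convGo (y.toNat + 2) x y (seq.getD [x])

-- ===== PORT B =====
-- the while-loop of Source B: v walks back from y, appending each visited v to path
def altGo (v : Int) (x : Int) (path : List Int) : Option (List Int) :=
  if v ≤ x then (if v = x then some path else none)
  else if v ≤ 0 then none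
  else if PySem.Int.mod v 2 = 0 then
    altGo (PySem.Int.floordiv v 2) x (path ++ [v])
  else if PySem.Int.mod v 10 = 1 then
    altGo (PySem.Int.floordiv (v - 1) 10) x (path ++ [v])
  else none
termination_by v.toNat
decreasing_by
  all_goals
    simp only [PySem.Int.floordiv_eq_ediv_of_pos (by norm_num : (0:Int) < 2),
      PySem.Int.floordiv_eq_ediv_of_pos (by norm_num : (0:Int) < 10),
      PySem.Int.mod_eq_emod_of_pos (by norm_num : (0:Int) < 2),
      PySem.Int.mod_eq_emod_of_pos (by norm_num : (0:Int) < 10)] at *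
  all_goals omega

def convertibilidad_alt (x : Int) (y : Int) (seq : Option (List Int)) : Option (List Int) :=
  let s := seq.getD [x]
  if y < x then none
  else
    match altGo y x [] with
    | some path => some (s ++ path.reverse)
    | none => none

-- ===== PRECONDITION & SPEC =====
-- Pre_ excludes exactly the inputs with x < y and x ≤ 0, on which the Python A recurses
-- forever on the *2 branch and dies with RecursionError (it never returns a value there).
def Pre_convertibilidad (x : Int) (y : Int) (seq : Option (List Int)) : Prop := x < y → 1 ≤ x
instance (x : Int) (y : Int) (seq : Option (List Int)) : Decidable (Pre_convertibilidad x y seq) := by unfold Pre_convertibilidad; infer_instance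
def pvWitness_convertibilidad : Int × Int × Option (List Int) := (1, 8, none)

def Spec_convertibilidad (x : Int) (y : Int) (seq : Option (List Int)) (out : Option (List Int)) : Prop := out = convertibilidad_alt x y seq
instance (x : Int) (y : Int) (seq : Option (List Int)) (out : Option (List Int)) : Decidable (Spec_convertibilidad x y seq out) := by unfold Spec_convertibilidad; infer_instance

-- ===== CLAIM (what is proved, stated in full; the proofs are below) =====
def Claim_equal_convertibilidad : Prop := ∀ (x : Int) (y : Int) (seq : Option (List Int)), Dom_convertibilidad x y seq → Pre_convertibilidad x y seq → Spec_convertibilidad x y seq (convertibilidad x y seq)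

-- ===== LEMMAS AND PROOFS =====

-- reference function: the (unique) forward step list from x up to v, in forward order
def chain (x : Int) (v : Int) : Option (List Int) :=
  if v ≤ x then (if v = x then some [] else none)
  else if v ≤ 0 then none
  else if PySem.Int.mod v 2 = 0 then
    (chain x (PySem.Int.floordiv v 2)).map (· ++ [v])
  else if PySem.Int.mod v 10 = 1 then
    (chain x (PySem.Int.floordiv (v - 1) 10)).map (· ++ [v])
  else none
termination_by v.toNat
decreasing_by
  all_goals
    simp only [PySem.Int.floordiv_eq_ediv_of_pos (by norm_num : (0:Int) < 2),
      PySem.Int.floordiv_eq_ediv_of_pos (by norm_num : (0:Int) < 10),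
      PySem.Int.mod_eq_emod_of_pos (by norm_num : (0:Int) < 2),
      PySem.Int.mod_eq_emod_of_pos (by norm_num : (0:Int) < 10)] at *
  all_goals omega

theorem chain_of_lt {x v : Int} (h : v < x) : chain x v = none := by
  rw [chain]; simp [le_of_lt h, ne_of_lt h]

theorem chain_self (x : Int) : chain x x = some [] := by
  rw [chain]; simp

-- B's loop computes chain, carrying the visited values in reverse in its accumulator
theorem altGo_eq_chain (v x : Int) (path : List Int) :
    altGo v x path = (chain x v).map (fun p => path ++ p.reverse) := by
  induction v, path using altGo.induct (x := x) with
  | case1 path => rw [altGo, chain]; simp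
  | case2 v path h he => rw [altGo, chain]; simp [h, he]
  | case3 v path h1 h2 => rw [altGo, chain]; simp [h1, h2]
  | case4 v path h1 h2 h3 ih =>
      rw [altGo, chain, if_neg h1, if_neg h1, if_neg h2, if_neg h2, if_pos h3, if_pos h3, ih]
      cases chain x (PySem.Int.floordiv v 2) <;> simp
  | case5 v path h1 h2 h3 h4 ih =>
      rw [altGo, chain, if_neg h1, if_neg h1, if_neg h2, if_neg h2, if_neg h3, if_neg h3,
        if_pos h4, if_pos h4, ih]
      cases chain x (PySem.Int.floordiv (v - 1) 10) <;> simp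
  | case6 v path h1 h2 h3 h4 =>
      rw [altGo, chain, if_neg h1, if_neg h1, if_neg h2, if_neg h2, if_neg h3, if_neg h3,
        if_neg h4, if_neg h4]
      simp

-- one backward step of chain, from any start s ≠ v (both sides none when v < s)
theorem chain_step_even (s v : Int) (h0 : 0 < v) (hne : v ≠ s)
    (h2 : PySem.Int.mod v 2 = 0) :
    chain s v = (chain s (PySem.Int.floordiv v 2)).map (· ++ [v]) := by
  have hfd : PySem.Int.floordiv v 2 = v / 2 := PySem.Int.floordiv_eq_ediv_of_pos (by norm_num)
  by_cases hvs : v ≤ s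
  · have hlt : v < s := lt_of_le_of_ne hvs hne
    rw [chain_of_lt hlt, chain_of_lt (show PySem.Int.floordiv v 2 < s by omega)]
    rfl
  · rw [chain, if_neg hvs, if_neg (by omega : ¬ v ≤ 0), if_pos h2]

theorem chain_step_one (s v : Int) (h0 : 0 < v) (hne : v ≠ s)
    (h10 : PySem.Int.mod v 10 = 1) :
    chain s v = (chain s (PySem.Int.floordiv (v - 1) 10)).map (· ++ [v]) := by
  have hfd : PySem.Int.floordiv (v - 1) 10 = (v - 1) / 10 :=
    PySem.Int.floordiv_eq_ediv_of_pos (by norm_num)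
  have hm10 : PySem.Int.mod v 10 = v % 10 := PySem.Int.mod_eq_emod_of_pos (by norm_num)
  have hm2 : PySem.Int.mod v 2 = v % 2 := PySem.Int.mod_eq_emod_of_pos (by norm_num)
  by_cases hvs : v ≤ s
  · have hlt : v < s := lt_of_le_of_ne hvs hne
    rw [chain_of_lt hlt, chain_of_lt (show PySem.Int.floordiv (v - 1) 10 < s by omega)]
    rfl
  · rw [chain, if_neg hvs, if_neg (by omega : ¬ v ≤ 0),
      if_neg (by omega : ¬ PySem.Int.mod v 2 = 0), if_pos h10]

-- the first forward step out of x is x*2 or x*10+1, and at most one of them succeeds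
theorem chain_head_aux (x : Int) (hx : 1 ≤ x) :
    ∀ (N : Nat) (v : Int), v.toNat = N → x < v →
    chain x v =
      (match chain (x * 2) v with
       | some p => some (x * 2 :: p)
       | none =>
         match chain (x * 10 + 1) v with
         | some p => some ((x * 10 + 1) :: p)
         | none => none) := by
  intro N
  induction N using Nat.strong_induction_on with
  | _ N ih =>
    intro v hN hv
    have h0 : 0 < v := by omega
    rw [chain, if_neg (by omega : ¬ v ≤ x), if_neg (by omega : ¬ v ≤ 0)]
    by_cases h2 : PySem.Int.mod v 2 = 0
    · have hfd : PySem.Int.floordiv v 2 = v / 2 := PySem.Int.floordiv_eq_ediv_of_pos (by norm_num)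
      have hm : PySem.Int.mod v 2 = v % 2 := PySem.Int.mod_eq_emod_of_pos (by norm_num)
      rw [if_pos h2]
      set w := PySem.Int.floordiv v 2 with hwdef
      by_cases hwx : w = x
      · have hv2 : v = x * 2 := by omega
        rw [hwx, chain_self, show x * 2 = v from hv2.symm, chain_self]
        simp [hv2]
      · have hne2 : v ≠ x * 2 := by omega
        have hne10 : v ≠ x * 10 + 1 := by omega
        rw [chain_step_even (x * 2) v h0 hne2 h2, chain_step_even (x * 10 + 1) v h0 hne10 h2]
        have hxw : chain x w =
            (match chain (x * 2) w with
             | some p => some (x * 2 :: p)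
             | none =>
               match chain (x * 10 + 1) w with
               | some p => some ((x * 10 + 1) :: p)
               | none => none) := by
          rcases lt_or_gt_of_ne (show w ≠ x from hwx) with hlt | hgt
          · rw [chain_of_lt hlt, chain_of_lt (show w < x * 2 by omega),
              chain_of_lt (show w < x * 10 + 1 by omega)]
          · exact ih w.toNat (by omega) w rfl hgt
        rw [hxw]
        cases chain (x * 2) w <;> cases chain (x * 10 + 1) w <;> simp
    · by_cases h10 : PySem.Int.mod v 10 = 1
      · have hfd : PySem.Int.floordiv (v - 1) 10 = (v - 1) / 10 :=
          PySem.Int.floordiv_eq_ediv_of_pos (by norm_num)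
        have hm : PySem.Int.mod v 10 = v % 10 := PySem.Int.mod_eq_emod_of_pos (by norm_num)
        rw [if_neg h2, if_pos h10]
        set w := PySem.Int.floordiv (v - 1) 10 with hwdef
        by_cases hwx : w = x
        · have hv10 : v = x * 10 + 1 := by omega
          have hlt2x : chain (x * 2) v = none := by
            rw [chain_step_one (x * 2) v h0 (by omega) h10]
            simp only [← hwdef, hwx]
            rw [chain_of_lt (show x < x * 2 by omega)]
            rfl
          rw [hwx, chain_self, hlt2x, show x * 10 + 1 = v from hv10.symm, chain_self]
          simp [hv10]
        · have hne2 : v ≠ x * 2 := by omega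
          have hne10 : v ≠ x * 10 + 1 := by omega
          rw [chain_step_one (x * 2) v h0 hne2 h10, chain_step_one (x * 10 + 1) v h0 hne10 h10]
          simp only [← hwdef]
          have hxw : chain x w =
              (match chain (x * 2) w with
               | some p => some (x * 2 :: p)
               | none =>
                 match chain (x * 10 + 1) w with
                 | some p => some ((x * 10 + 1) :: p)
                 | none => none) := by
            rcases lt_or_gt_of_ne (show w ≠ x from hwx) with hlt | hgt
            · rw [chain_of_lt hlt, chain_of_lt (show w < x * 2 by omega),
                chain_of_lt (show w < x * 10 + 1 by omega)]
            · exact ih w.toNat (by omega) w rfl hgt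
          rw [hxw]
          cases chain (x * 2) w <;> cases chain (x * 10 + 1) w <;> simp
      · have hm10 : PySem.Int.mod v 10 = v % 10 := PySem.Int.mod_eq_emod_of_pos (by norm_num)
        have hm2 : PySem.Int.mod v 2 = v % 2 := PySem.Int.mod_eq_emod_of_pos (by norm_num)
        rw [if_neg h2, if_neg h10]
        have ha : chain (x * 2) v = none := by
          by_cases hvs : v ≤ x * 2
          · rw [chain_of_lt (lt_of_le_of_ne hvs (by omega))]
          · rw [chain, if_neg hvs, if_neg (by omega : ¬ v ≤ 0), if_neg h2, if_neg h10]
        have hb : chain (x * 10 + 1) v = none := by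
          by_cases hvs : v ≤ x * 10 + 1
          · rw [chain_of_lt (lt_of_le_of_ne hvs (by omega))]
          · rw [chain, if_neg hvs, if_neg (by omega : ¬ v ≤ 0), if_neg h2, if_neg h10]
        rw [ha, hb]

theorem chain_head (x v : Int) (hx : 1 ≤ x) (hv : x < v) :
    chain x v =
      (match chain (x * 2) v with
       | some p => some (x * 2 :: p)
       | none =>
         match chain (x * 10 + 1) v with
         | some p => some ((x * 10 + 1) :: p)
         | none => none) :=
  chain_head_aux x hx v.toNat v rfl hv

theorem convGo_succ (fuel : Nat) (x y : Int) (s : List Int) :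
    convGo (fuel + 1) x y s =
      (if x = y then some s
       else if x > y then none
       else
         match convGo fuel (x * 2) y (s ++ [x * 2]) with
         | some res => some res
         | none =>
           match convGo fuel (x * 10 + 1) y (s ++ [x * 10 + 1]) with
           | some res => some res
           | none => none) := rfl

-- A's DFS computes chain too, for any fuel large enough that x out-doubles y
theorem convGo_eq_chain : ∀ (fuel : Nat) (x y : Int) (s : List Int), 1 ≤ x →
    y < x * 2 ^ fuel → convGo fuel x y s = (chain x y).map (fun p => s ++ p) := by
  intro fuel
  induction fuel with
  | zero =>
    intro x y s hx hf
    rw [pow_zero, mul_one] at hf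
    rw [chain_of_lt hf]
    rfl
  | succ n ih =>
    intro x y s hx hf
    rw [convGo_succ]
    by_cases hxy : x = y
    · subst hxy; rw [if_pos rfl, chain_self]; simp
    · rw [if_neg hxy]
      by_cases hgt : x > y
      · rw [if_pos hgt, chain_of_lt hgt]; rfl
      · rw [if_neg hgt]
        have hlt : x < y := by omega
        have hsplit : x * 2 ^ (n + 1) = (x * 2) * 2 ^ n := by ring
        have hpow : (0:Int) ≤ 2 ^ n := by positivity
        have h1 := ih (x * 2) y (s ++ [x * 2]) (by omega) (by omega)
        have h2 := ih (x * 10 + 1) y (s ++ [x * 10 + 1]) (by omega)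
          (by
            have : (x * 2) * 2 ^ n ≤ (x * 10 + 1) * 2 ^ n :=
              mul_le_mul_of_nonneg_right (by omega) hpow
            omega)
        rw [h1, h2, chain_head x y hx hlt]
        cases chain (x * 2) y <;> cases chain (x * 10 + 1) y <;> simp

theorem alt_eq_chain (x y : Int) (seq : Option (List Int)) :
    convertibilidad_alt x y seq = (chain x y).map (fun p => (seq.getD [x]) ++ p) := by
  unfold convertibilidad_alt
  rw [altGo_eq_chain]
  by_cases h : y < x
  · rw [if_pos h, chain_of_lt h]; rfl
  · rw [if_neg h]; cases chain x y <;> simp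

-- ===== VERDICT (by name: the statement is the Claim_ definition above) =====
theorem convertibilidad_spec : Claim_equal_convertibilidad := by
  intro x y seq _ hpre
  show convertibilidad x y seq = convertibilidad_alt x y seq
  rw [alt_eq_chain]
  unfold convertibilidad
  by_cases hxy : x < y
  · have hx := hpre hxy
    apply convGo_eq_chain _ _ _ _ hx
    have h1 : (y.toNat : Int) < 2 ^ (y.toNat + 2) := by
      have ha := Nat.lt_two_pow_self (n := y.toNat)
      have hb : (2:Nat) ^ y.toNat ≤ 2 ^ (y.toNat + 2) :=
        Nat.pow_le_pow_right (by norm_num) (by omega)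
      exact_mod_cast lt_of_lt_of_le ha hb
    have h2 : y ≤ (y.toNat : Int) := Int.self_le_toNat y
    have h3 : 1 * 2 ^ (y.toNat + 2) ≤ x * 2 ^ (y.toNat + 2) :=
      mul_le_mul_of_nonneg_right hx (by positivity)
    omega
  · show convGo (y.toNat + 1 + 1) x y (seq.getD [x]) = _
    rw [convGo_succ]
    by_cases heq : x = y
    · subst heq; rw [if_pos rfl, chain_self]; simp
    · rw [if_neg heq, if_pos (by omega : x > y), chain_of_lt (by omega : y < x)]
      rfl
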